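-- pv_equiv track=rewrite | github.com/jakubmanczak/uam-kogni-programowanie-sem2 | 2025-04-23--11.py | cyfry_na_kwadraty
-- ===== SOURCE A (Python) =====
-- def cyfry_na_kwadraty(liczba):
--     lista_cyfr = []
--     while liczba != 0:
--         if liczba % 10 == 0:
--             lista_cyfr.insert(0, 0)
--         else:
--             lista_cyfr.insert(0, liczba % 10)
--         liczba = int(liczba / 10) # liczba = liczba // 10 <- czy tak w ogóle można?
--     nowa_liczba = 0
--     for liczba in lista_cyfr:
--         kwadrat = liczba**2
--         if kwadrat >= 10:
--             nowa_liczba *= 100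
--         else:
--             nowa_liczba *= 10
--         nowa_liczba += kwadrat
--     return nowa_liczba
-- ===== SOURCE B (Python) =====
-- def cyfry_na_kwadraty(liczba):
--     nowa_liczba = 0
--     mnoznik = 1
--     while liczba != 0:
--         kwadrat = (liczba % 10) ** 2
--         nowa_liczba += kwadrat * mnoznik
--         mnoznik *= 100 if kwadrat >= 10 else 10
--         liczba = int(liczba / 10)
--     return nowa_liczba
-- ===== Notes on version B (the rewrite author's own statement) =====
-- stated objective: simpler
-- what changed: B drops A's digit list and second pass: it processes digits least-significant-first in one loop, placing each squared digit directly with a running place-value multiplier.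
import Mathlib
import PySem

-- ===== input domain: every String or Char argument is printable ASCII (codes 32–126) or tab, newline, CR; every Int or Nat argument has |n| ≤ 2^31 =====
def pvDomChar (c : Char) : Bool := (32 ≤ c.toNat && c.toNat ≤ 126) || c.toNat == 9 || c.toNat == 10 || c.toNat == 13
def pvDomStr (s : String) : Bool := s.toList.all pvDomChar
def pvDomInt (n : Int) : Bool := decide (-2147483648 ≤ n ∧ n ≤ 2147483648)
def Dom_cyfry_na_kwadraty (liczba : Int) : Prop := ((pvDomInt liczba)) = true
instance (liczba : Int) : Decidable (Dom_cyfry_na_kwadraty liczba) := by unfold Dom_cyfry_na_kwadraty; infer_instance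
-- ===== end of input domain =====

-- B replaces A's two-pass digit-list build (insert(0,..)) + fold with a single
-- least-significant-first loop carrying a running place-value multiplier (objective: simpler).
-- Python's int(liczba / 10) is ported as truncating division (exact for |liczba| ≤ 2^31).

-- termination helper, cited by both ports
theorem pvTdiv10_lt (n : Int) (h : n ≠ 0) : (PySem.Int.truncdiv n 10).natAbs < n.natAbs := by
  simp only [PySem.Int.truncdiv]
  rw [Int.natAbs_tdiv]
  exact Nat.div_lt_self (by omega) (by norm_num)

-- ===== PORT A =====
-- the while-loop building lista_cyfr front-to-back via insert(0, …)
def pvAGo (liczba : Int) (lista_cyfr : List Int) : List Int :=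
  if h : liczba = 0 then lista_cyfr
  else
    pvAGo (PySem.Int.truncdiv liczba 10)
      ((if PySem.Int.mod liczba 10 = 0 then 0 else PySem.Int.mod liczba 10) :: lista_cyfr)
termination_by liczba.natAbs
decreasing_by exact pvTdiv10_lt _ h

def cyfry_na_kwadraty (liczba : Int) : Int :=
  let lista_cyfr := pvAGo liczba []
  lista_cyfr.foldl
    (fun nowa_liczba d =>
      let kwadrat := d ^ 2
      (if kwadrat ≥ 10 then nowa_liczba * 100 else nowa_liczba * 10) + kwadrat) 0

-- ===== PORT B =====
def pvBGo (liczba nowa_liczba mnoznik : Int) : Int :=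
  if h : liczba = 0 then nowa_liczba
  else
    let kwadrat := (PySem.Int.mod liczba 10) ^ 2
    pvBGo (PySem.Int.truncdiv liczba 10) (nowa_liczba + kwadrat * mnoznik)
      (mnoznik * (if kwadrat ≥ 10 then 100 else 10))
termination_by liczba.natAbs
decreasing_by exact pvTdiv10_lt _ h

def cyfry_na_kwadraty_alt (liczba : Int) : Int := pvBGo liczba 0 1

-- ===== PRECONDITION & SPEC =====
def Spec_cyfry_na_kwadraty (liczba : Int) (out : Int) : Prop := out = cyfry_na_kwadraty_alt liczba
instance (liczba : Int) (out : Int) : Decidable (Spec_cyfry_na_kwadraty liczba out) := by unfold Spec_cyfry_na_kwadraty; infer_instance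

-- ===== CLAIM (what is proved, stated in full; the proofs are below) =====
def Claim_equal_cyfry_na_kwadraty : Prop := ∀ (liczba : Int), Dom_cyfry_na_kwadraty liczba → Spec_cyfry_na_kwadraty liczba (cyfry_na_kwadraty liczba)

-- ===== LEMMAS AND PROOFS =====

-- A's fold function, named for the proofs
def pvF (nowa_liczba d : Int) : Int :=
  let kwadrat := d ^ 2
  (if kwadrat >= 10 then nowa_liczba * 100 else nowa_liczba * 10) + kwadrat

theorem pvAGo_ne (n : Int) (h : n ≠ 0) (acc : List Int) :
    pvAGo n acc = pvAGo (PySem.Int.truncdiv n 10)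
      ((if PySem.Int.mod n 10 = 0 then 0 else PySem.Int.mod n 10) :: acc) := by
  conv_lhs => rw [pvAGo]
  rw [dif_neg h]

theorem pvBGo_ne (n r m : Int) (h : n ≠ 0) :
    pvBGo n r m = pvBGo (PySem.Int.truncdiv n 10) (r + (PySem.Int.mod n 10) ^ 2 * m)
      (m * (if (PySem.Int.mod n 10) ^ 2 >= 10 then 100 else 10)) := by
  conv_lhs => rw [pvBGo]
  rw [dif_neg h]

theorem pvAGo_append (k : Nat) :
    ∀ (n : Int), n.natAbs ≤ k → ∀ acc, pvAGo n acc = pvAGo n [] ++ acc := by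
  induction k with
  | zero =>
    intro n hn acc
    have h0 : n = 0 := by omega
    subst h0
    simp [pvAGo]
  | succ k ih =>
    intro n hn acc
    by_cases h : n = 0
    · subst h; simp [pvAGo]
    · have hlt : (PySem.Int.truncdiv n 10).natAbs ≤ k := by
        have := pvTdiv10_lt n h; omega
      rw [pvAGo_ne n h acc, pvAGo_ne n h []]
      conv_rhs => rw [ih _ hlt]
      rw [ih _ hlt]
      simp

theorem pvBGo_char (k : Nat) :
    ∀ (n : Int), n.natAbs ≤ k → ∀ r m,
      pvBGo n r m = r + m * ((pvAGo n []).foldl pvF 0) := by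
  induction k with
  | zero =>
    intro n hn r m
    have h0 : n = 0 := by omega
    subst h0
    simp [pvBGo, pvAGo]
  | succ k ih =>
    intro n hn r m
    by_cases h : n = 0
    · subst h; simp [pvBGo, pvAGo]
    · have hlt : (PySem.Int.truncdiv n 10).natAbs ≤ k := by
        have := pvTdiv10_lt n h; omega
      have hdig : (if PySem.Int.mod n 10 = 0 then 0 else PySem.Int.mod n 10)
          = PySem.Int.mod n 10 := by split <;> omega
      rw [pvBGo_ne n r m h, ih _ hlt, pvAGo_ne n h [], hdig,
        pvAGo_append k _ hlt [PySem.Int.mod n 10], List.foldl_append]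
      simp only [List.foldl_cons, List.foldl_nil, pvF]
      split_ifs <;> ring

-- ===== VERDICT (by name: the statement is the Claim_ definition above) =====
theorem cyfry_na_kwadraty_spec : Claim_equal_cyfry_na_kwadraty := by
  intro n _
  show cyfry_na_kwadraty n = cyfry_na_kwadraty_alt n
  have hB := pvBGo_char n.natAbs n le_rfl 0 1
  have hA : cyfry_na_kwadraty n = (pvAGo n []).foldl pvF 0 := rfl
  rw [hA, cyfry_na_kwadraty_alt, hB]
  ring
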